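-- pv_equiv track=rewrite | github.com/Barbod1380/KedroPipeline-Jules | src/data_pipeline/pipelines/utils/read_text.py | has_valid_changes
-- ===== SOURCE A (Python) =====
-- def has_valid_changes(
--     source_word: str, candidate_word: str, valid_changes_dict: dict
-- ) -> bool:
--     """
--     Check if the changes from source_word to candidate_word are valid based on a dictionary of valid changes.
--
--     Args:
--         source_word (str): The original word.
--         candidate_word (str): The candidate corrected word.
--         valid_changes_dict (dict): A dictionary where keys are characters in the source word
--                                    and values are sets of valid replacement characters.
--
--     Returns:
--         bool: True if all character changes are valid, False otherwise.
--     """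
--     if len(source_word) != len(candidate_word):
--         return False
--
--     changes_cnt = 0
--
--     for s_char, c_char in zip(source_word, candidate_word):
--         if s_char != c_char:
--             if (
--                 s_char not in valid_changes_dict
--                 or c_char not in valid_changes_dict[s_char]
--             ):
--                 return False
--             else:
--                 changes_cnt += 1
--
--             if changes_cnt > 1:
--                 return False
--     return True
-- ===== SOURCE B (Python) =====
-- def has_valid_changes(source_word, candidate_word, valid_changes_dict):
--     if len(source_word) != len(candidate_word):
--         return False
--     for i, (a, b) in enumerate(zip(source_word, candidate_word)):
--         if a != b:
--             # first mismatch: it must be a valid change, and the rest must match exactly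
--             return (
--                 a in valid_changes_dict
--                 and b in valid_changes_dict[a]
--                 and source_word[i + 1:] == candidate_word[i + 1:]
--             )
--     return True
-- ===== Notes on version B (the rewrite author's own statement) =====
-- stated objective: simpler
-- what changed: Drops A's change counter and per-change loop state: B locates the first mismatching position, validates that single change against the dict, and requires the remaining suffixes to be identical strings (so any second mismatch is rejected by a plain suffix equality test, not a counter).
import Mathlib
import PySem

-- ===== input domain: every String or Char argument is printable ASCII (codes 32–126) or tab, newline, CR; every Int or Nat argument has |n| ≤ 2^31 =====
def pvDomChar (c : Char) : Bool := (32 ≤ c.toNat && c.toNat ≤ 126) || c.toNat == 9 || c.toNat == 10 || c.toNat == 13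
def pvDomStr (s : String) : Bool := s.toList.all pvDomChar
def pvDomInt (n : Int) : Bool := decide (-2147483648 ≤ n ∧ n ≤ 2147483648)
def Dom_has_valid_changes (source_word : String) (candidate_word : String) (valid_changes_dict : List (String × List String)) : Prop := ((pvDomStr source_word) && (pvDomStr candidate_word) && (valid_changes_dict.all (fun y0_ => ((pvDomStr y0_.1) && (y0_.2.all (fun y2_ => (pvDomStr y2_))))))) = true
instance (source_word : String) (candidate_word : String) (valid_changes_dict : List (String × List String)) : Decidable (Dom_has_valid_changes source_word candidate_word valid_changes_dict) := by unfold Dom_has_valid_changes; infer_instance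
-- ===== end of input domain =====

-- B drops A's change counter: it finds the FIRST mismatch, validates that single
-- change against the dict, and requires the remaining suffixes to be identical
-- strings; objective: simpler (no loop state beyond the position).

-- ===== PORT A =====
-- the for-loop over zip(source_word, candidate_word) carrying changes_cnt
def pvLoopA : List (Char × Char) → Nat → List (String × List String) → Bool
  | [], _, _ => true
  | (s_char, c_char) :: rest, changes_cnt, d =>
    if s_char ≠ c_char then
      -- 's_char not in valid_changes_dict or c_char not in valid_changes_dict[s_char]'
      -- (short-circuit: the [] lookup only happens when the key is present)
      match PySem.Dict.get? (PySem.Dict.mk d) (String.ofList [s_char]) with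
      | none => false
      | some vs =>
        if ¬ (List.contains vs (String.ofList [c_char])) then false
        else
          let changes_cnt := changes_cnt + 1
          if changes_cnt > 1 then false
          else pvLoopA rest changes_cnt d
    else pvLoopA rest changes_cnt d

def has_valid_changes (source_word : String) (candidate_word : String) (valid_changes_dict : List (String × List String)) : Bool :=
  if source_word.toList.length ≠ candidate_word.toList.length then false
  else pvLoopA (List.zip source_word.toList candidate_word.toList) 0 valid_changes_dict

-- ===== PORT B =====
-- the for-loop over enumerate(zip(source_word, candidate_word)); at the first
-- mismatch it returns 'a in d and b in d[a] and source_word[i+1:] == candidate_word[i+1:]'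
def pvLoopB (sw cw : List Char) (d : List (String × List String)) : List (Char × Char) → Nat → Bool
  | [], _ => true
  | (a, b) :: rest, i =>
    if a ≠ b then
      match PySem.Dict.get? (PySem.Dict.mk d) (String.ofList [a]) with
      | none => false
      | some vs =>
        List.contains vs (String.ofList [b]) &&
          (PySem.List.slice sw (some ((i : Int) + 1)) none ==
           PySem.List.slice cw (some ((i : Int) + 1)) none)
    else pvLoopB sw cw d rest (i + 1)

def has_valid_changes_alt (source_word : String) (candidate_word : String) (valid_changes_dict : List (String × List String)) : Bool :=
  if source_word.toList.length ≠ candidate_word.toList.length then false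
  else pvLoopB source_word.toList candidate_word.toList valid_changes_dict
        (List.zip source_word.toList candidate_word.toList) 0

-- ===== PRECONDITION & SPEC =====
def Spec_has_valid_changes (source_word : String) (candidate_word : String) (valid_changes_dict : List (String × List String)) (out : Bool) : Prop := out = has_valid_changes_alt source_word candidate_word valid_changes_dict
instance (source_word : String) (candidate_word : String) (valid_changes_dict : List (String × List String)) (out : Bool) : Decidable (Spec_has_valid_changes source_word candidate_word valid_changes_dict out) := by unfold Spec_has_valid_changes; infer_instance

-- ===== CLAIM (what is proved, stated in full; the proofs are below) =====
def Claim_equal_has_valid_changes : Prop := ∀ (source_word : String) (candidate_word : String) (valid_changes_dict : List (String × List String)), Dom_has_valid_changes source_word candidate_word valid_changes_dict → Spec_has_valid_changes source_word candidate_word valid_changes_dict (has_valid_changes source_word candidate_word valid_changes_dict)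

-- ===== LEMMAS AND PROOFS =====

-- after the first (valid) change A's loop accepts iff no further pair differs
theorem pvLoopA_one (pairs : List (Char × Char)) (d : List (String × List String)) :
    pvLoopA pairs 1 d = pairs.all (fun p => p.1 == p.2) := by
  induction pairs with
  | nil => simp [pvLoopA]
  | cons hd rest ih =>
    obtain ⟨a, b⟩ := hd
    by_cases hab : a = b
    · subst hab; simp [pvLoopA, ih]
    · cases hget : PySem.Dict.get? (PySem.Dict.mk d) (String.ofList [a]) with
      | none => simp [pvLoopA, hab, hget]
      | some vs => by_cases hc : String.ofList [b] ∈ vs <;> simp [pvLoopA, hab, hget, hc]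

theorem pvZipDrop (n : Nat) : ∀ (xs ys : List Char), (xs.zip ys).drop n = (xs.drop n).zip (ys.drop n) := by
  induction n with
  | zero => simp
  | succ n ih =>
    intro xs ys
    cases xs with
    | nil => simp
    | cons x xt =>
      cases ys with
      | nil => simp
      | cons y yt => simpa using ih xt yt

theorem pvBeqAll : ∀ (xs ys : List Char), xs.length = ys.length →
    (xs == ys) = (xs.zip ys).all (fun p => p.1 == p.2) := by
  intro xs
  induction xs with
  | nil => intro ys h; cases ys <;> simp_all
  | cons x xt ih =>
    intro ys h
    cases ys with
    | nil => simp at h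
    | cons y yt =>
      by_cases hxy : x = y
      · subst hxy
        have := ih yt (by simpa using h)
        simpa using this
      · have hb : (x == y) = false := by simp [hxy]
        simp [hb]

-- the suffix slices agree iff every remaining zipped pair is equal (lengths equal)
theorem pvSuffix_eq (sw cw : List Char) (i : Nat) (h : sw.length = cw.length) :
    (PySem.List.slice sw (some ((i : Int) + 1)) none ==
     PySem.List.slice cw (some ((i : Int) + 1)) none) =
      ((List.zip sw cw).drop (i + 1)).all (fun p => p.1 == p.2) := by
  have hs : ((i : Int) + 1) = ((i + 1 : Nat) : Int) := by push_cast; ring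
  rw [hs, PySem.List.slice_from_natCast, PySem.List.slice_from_natCast, pvZipDrop]
  exact pvBeqAll _ _ (by simp [h])

-- A's loop (count 0) equals B's loop at any start index, given equal lengths
theorem pvLoop_eq (sw cw : List Char) (d : List (String × List String))
    (h : sw.length = cw.length) :
    ∀ (i : Nat), pvLoopA ((List.zip sw cw).drop i) 0 d = pvLoopB sw cw d ((List.zip sw cw).drop i) i := by
  intro i
  generalize hp : (List.zip sw cw).drop i = pairs
  induction pairs generalizing i with
  | nil => simp [pvLoopA, pvLoopB]
  | cons hd rest ih =>
    obtain ⟨a, b⟩ := hd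
    have hrest : (List.zip sw cw).drop (i + 1) = rest := by
      have h1 : List.drop 1 (List.drop i (sw.zip cw)) = rest := by rw [hp]; simp
      rw [List.drop_drop] at h1
      simpa using h1
    by_cases hab : a = b
    · subst hab
      simpa [pvLoopA, pvLoopB] using ih (i + 1) hrest
    · simp only [pvLoopA, pvLoopB, if_pos hab, ne_eq]
      cases hget : PySem.Dict.get? (PySem.Dict.mk d) (String.ofList [a]) with
      | none => rfl
      | some vs =>
        by_cases hc : String.ofList [b] ∈ vs
        · have hkey := pvSuffix_eq sw cw i h
          simp [hc, pvLoopA_one, hrest, hkey]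
        · simp [hc]

-- ===== VERDICT (by name: the statement is the Claim_ definition above) =====
theorem has_valid_changes_spec : Claim_equal_has_valid_changes := by
  intro source_word candidate_word valid_changes_dict _
  unfold Spec_has_valid_changes has_valid_changes has_valid_changes_alt
  by_cases hlen : source_word.toList.length = candidate_word.toList.length
  · rw [if_neg (fun h => h hlen), if_neg (fun h => h hlen)]
    have := pvLoop_eq source_word.toList candidate_word.toList valid_changes_dict hlen 0
    simpa using this
  · rw [if_pos hlen, if_pos hlen]
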